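-- pv_equiv track=rewrite | github.com/MansiDiego/laboratorioDePython | guia7.py | pos_secuencia_ordenada_mas_larga
-- ===== SOURCE A (Python) =====
-- def pos_secuencia_ordenada_mas_larga(s: list[int]) -> int:
--     inicio_actual = 0
--     long_actual = 1
--     inicio_max = 0
--     long_max = 1
--
--     i = 0
--     while i < len(s) - 1:
--         if s[i] <= s[i + 1]:
--             # sigue ordenada
--             long_actual += 1
--         else:
--             # se rompió la secuencia
--             if long_actual > long_max:
--                 long_max = long_actual
--                 inicio_max = inicio_actual
--             # reinicio para la nueva secuencia
--             inicio_actual = i + 1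
--             long_actual = 1
--         i += 1
--
--     # al final del bucle hay que comparar por si la secuencia más larga termina al final
--     if long_actual > long_max:
--         long_max = long_actual
--         inicio_max = inicio_actual
--
--     return inicio_max
-- ===== SOURCE B (Python) =====
-- def pos_secuencia_ordenada_mas_larga(s: list[int]) -> int:
--     n = len(s)
--     # phase 1: run starts (a new run begins after every descent)
--     starts = [0] + [i + 1 for i in range(n - 1) if s[i] > s[i + 1]]
--     ends = starts[1:] + [n]
--     # phase 2: first-wins argmax over the (start, end) segments
--     best = (0, 0)
--     for st, en in zip(starts, ends):
--         if en - st > best[1]: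
--             best = (st, en - st)
--     return best[0]
-- ===== Notes on version B (the rewrite author's own statement) =====
-- stated objective: alternative
-- what changed: A fuses run-tracking and argmax into one stateful while-loop with a trailing fix-up comparison; B separates them into two passes: first build the list of run start indices (a new run after each descent), then take a first-wins argmax over the resulting (start,end) segments.
import Mathlib
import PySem

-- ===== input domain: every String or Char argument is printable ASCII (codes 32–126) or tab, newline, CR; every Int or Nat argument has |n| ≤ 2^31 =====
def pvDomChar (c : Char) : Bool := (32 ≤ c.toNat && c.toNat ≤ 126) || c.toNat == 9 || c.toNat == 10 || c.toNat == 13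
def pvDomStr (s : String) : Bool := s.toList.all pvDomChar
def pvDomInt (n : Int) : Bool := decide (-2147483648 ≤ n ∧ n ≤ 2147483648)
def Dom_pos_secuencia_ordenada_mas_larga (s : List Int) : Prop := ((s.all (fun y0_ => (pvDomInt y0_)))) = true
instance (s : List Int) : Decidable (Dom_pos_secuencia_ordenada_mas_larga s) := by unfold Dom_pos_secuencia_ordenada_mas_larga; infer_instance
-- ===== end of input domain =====

-- B separates A's fused while-loop into two passes: build run-start indices, then a first-wins argmax over segments.


-- ===== PORT A =====
-- one while-loop step of A; loop indices i and i+1 are always in range, so getD is exact here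
def aStep (s : List Int) (a : Int × Int × Int × Int) (i : Nat) : Int × Int × Int × Int :=
  match a with
  | (ia, la, im, lm) =>
    if s.getD i 0 ≤ s.getD (i+1) 0 then (ia, la+1, im, lm)
    else if la > lm then ((i:Int)+1, 1, ia, la)
    else ((i:Int)+1, 1, im, lm)

def pos_secuencia_ordenada_mas_larga (s : List Int) : Int :=
  match List.foldl (aStep s) (0, 1, 0, 1) (List.range (s.length - 1)) with
  | (_ia, la, im, lm) => if la > lm then _ia else im

-- ===== PORT B =====
-- the comprehension [0] + [i+1 for i in range(n-1) if s[i] > s[i+1]]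
def bStarts (s : List Int) : List Int :=
  [0] ++ ((List.range (s.length - 1)).filter (fun i => s.getD (i+1) 0 < s.getD i 0)).map
    (fun i => (i:Int)+1)

-- one step of B's argmax loop over (start, end) pairs
def bStep (best : Int × Int) (p : Int × Int) : Int × Int :=
  if p.2 - p.1 > best.2 then (p.1, p.2 - p.1) else best

def pos_secuencia_ordenada_mas_larga_alt (s : List Int) : Int :=
  (List.foldl bStep (0, 0) ((bStarts s).zip ((bStarts s).drop 1 ++ [(s.length : Int)]))).1

-- ===== PRECONDITION & SPEC =====
def Spec_pos_secuencia_ordenada_mas_larga (s : List Int) (out : Int) : Prop := out = pos_secuencia_ordenada_mas_larga_alt s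
instance (s : List Int) (out : Int) : Decidable (Spec_pos_secuencia_ordenada_mas_larga s out) := by unfold Spec_pos_secuencia_ordenada_mas_larga; infer_instance

-- ===== CLAIM (what is proved, stated in full; the proofs are below) =====
def Claim_equal_pos_secuencia_ordenada_mas_larga : Prop := ∀ (s : List Int), Dom_pos_secuencia_ordenada_mas_larga s → Spec_pos_secuencia_ordenada_mas_larga s (pos_secuencia_ordenada_mas_larga s)

-- ===== LEMMAS AND PROOFS =====

-- bStarts with a generalized range bound
def startsK (s : List Int) (k : Nat) : List Int :=
  0 :: ((List.range k).filter (fun i => s.getD (i+1) 0 < s.getD i 0)).map (fun i => (i:Int)+1)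

-- consecutive pairs of a list
def segzip : List Int → List (Int × Int)
  | a :: b :: t => (a, b) :: segzip (b :: t)
  | _ => []

theorem bStarts_eq (s : List Int) : bStarts s = startsK s (s.length - 1) := rfl

theorem zip_eq_segzip : ∀ (xs : List Int) (a c : Int),
    (a :: xs).zip (xs ++ [c]) = segzip (a :: (xs ++ [c])) := by
  intro xs
  induction xs with
  | nil => intro a c; simp [segzip]
  | cons b t ih =>
    intro a c
    simp only [List.cons_append, segzip, List.zip_cons_cons]
    exact congrArg _ (ih b c)

theorem segzip_append_last : ∀ (pre : List Int) (a c : Int),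
    segzip ((pre ++ [a]) ++ [c]) = segzip (pre ++ [a]) ++ [(a, c)] := by
  intro pre
  induction pre with
  | nil => intro a c; simp [segzip]
  | cons x p ih =>
    intro a c
    cases p with
    | nil => simp [segzip]
    | cons y p' =>
      have h := ih a c
      simp only [List.cons_append, segzip] at h ⊢
      simpa using h

theorem startsK_succ (s : List Int) (k : Nat) :
    startsK s (k+1) = startsK s k ++
      (if s.getD (k+1) 0 < s.getD k 0 then [(k:Int)+1] else []) := by
  by_cases h : s.getD (k+1) 0 < s.getD k 0 <;>
  · simp only [List.getD_eq_getElem?_getD] at h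
    simp [startsK, List.range_succ, List.filter_append, h]

-- loop invariant: A's running state vs B's run-start list and the argmax over closed segments
def AInv (s : List Int) (k : Nat) : Prop :=
  match List.foldl (aStep s) (0, 1, 0, 1) (List.range k) with
  | (ia, la, im, lm) =>
    (startsK s k = [0] ∧ ia = 0 ∧ im = 0 ∧ lm = 1 ∧ la = (k:Int)+1)
    ∨ (∃ pre, pre ≠ [] ∧ 1 ≤ k ∧ startsK s k = pre ++ [ia] ∧ la = (k:Int)+1 - ia ∧
        List.foldl bStep (0,0) (segzip (pre ++ [ia])) = (im, lm))

theorem aInv_holds (s : List Int) : ∀ k, AInv s k := by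
  intro k
  induction k with
  | zero =>
    unfold AInv
    simp only [List.range_zero, List.foldl_nil]
    left
    norm_num [startsK]
  | succ k ih =>
    unfold AInv at ih ⊢
    rw [List.range_succ, List.foldl_append, List.foldl_cons, List.foldl_nil]
    rcases hfold : List.foldl (aStep s) (0, 1, 0, 1) (List.range k) with ⟨ia, la, im, lm⟩
    rw [hfold] at ih
    rw [startsK_succ]
    by_cases hcmp : s.getD k 0 ≤ s.getD (k+1) 0
    · -- run continues: starts unchanged
      have hnot : ¬ s.getD (k+1) 0 < s.getD k 0 := not_lt.mpr hcmp
      rw [if_neg hnot, List.append_nil]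
      simp only [aStep, if_pos hcmp]
      rcases ih with ⟨h1, h2, h3, h4, h5⟩ | ⟨pre, hne, hk, hst, hla, hfd⟩
      · left; exact ⟨h1, h2, h3, h4, by push_cast; omega⟩
      · right; exact ⟨pre, hne, by omega, hst, by push_cast at hla ⊢; omega, hfd⟩
    · -- descent at k: the current run closes, a new run starts at k+1
      have hlt : s.getD (k+1) 0 < s.getD k 0 := lt_of_not_ge hcmp
      rw [if_pos hlt]
      simp only [aStep, if_neg hcmp]
      by_cases hll : la > lm
      · rw [if_pos hll]
        rcases ih with ⟨h1, h2, h3, h4, h5⟩ | ⟨pre, hne, hk, hst, hla, hfd⟩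
        · right
          refine ⟨[0], by simp, by omega, by rw [h1], by push_cast; ring, ?_⟩
          simp only [segzip, List.foldl, bStep, List.singleton_append]
          rw [if_pos (by omega : ((k:Int)+1) - 0 > 0)]
          rw [h2, h5]; norm_num
        · right
          refine ⟨pre ++ [ia], by simp, by omega, by rw [hst], by push_cast; ring, ?_⟩
          rw [segzip_append_last, List.foldl_append, hfd]
          simp only [List.foldl, bStep]
          rw [if_pos (by omega : ((k:Int)+1) - ia > lm)]
          rw [show (k:Int)+1-ia = la from by omega]
      · rw [if_neg hll]
        rcases ih with ⟨h1, h2, h3, h4, h5⟩ | ⟨pre, hne, hk, hst, hla, hfd⟩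
        · right
          refine ⟨[0], by simp, by omega, by rw [h1], by push_cast; ring, ?_⟩
          simp only [segzip, List.foldl, bStep, List.singleton_append]
          rw [if_pos (by omega : ((k:Int)+1) - 0 > 0)]
          rw [h3, h4]
          have : (k:Int)+1 = 1 := by omega
          rw [this]; norm_num
        · right
          refine ⟨pre ++ [ia], by simp, by omega, by rw [hst], by push_cast; ring, ?_⟩
          rw [segzip_append_last, List.foldl_append, hfd]
          simp only [List.foldl, bStep]
          rw [if_neg (by omega : ¬ ((k:Int)+1) - ia > lm)]

-- ===== VERDICT (by name: the statement is the Claim_ definition above) =====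
theorem pos_secuencia_ordenada_mas_larga_spec : Claim_equal_pos_secuencia_ordenada_mas_larga := by
  intro s _
  unfold Spec_pos_secuencia_ordenada_mas_larga
  unfold pos_secuencia_ordenada_mas_larga pos_secuencia_ordenada_mas_larga_alt
  have hinv := aInv_holds s (s.length - 1)
  unfold AInv at hinv
  rcases hfold : List.foldl (aStep s) (0, 1, 0, 1) (List.range (s.length - 1)) with ⟨ia, la, im, lm⟩
  rw [hfold] at hinv
  rw [bStarts_eq]
  rcases hinv with ⟨h1, h2, h3, h4, h5⟩ | ⟨pre, hne, hk, hst, hla, hfd⟩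
  · -- whole list nondecreasing: both sides return 0
    rw [h1]
    simp only [List.drop, List.zip, List.zipWith, List.nil_append, List.foldl, bStep]
    rw [h2, h3]
    show (if la > lm then (0:Int) else 0) = _
    split_ifs <;> simp
  · -- at least one descent
    rcases pre with _ | ⟨p0, pre'⟩
    · exact absurd rfl hne
    rw [List.cons_append] at hst hfd
    rw [hst]
    have hzip : ((p0 :: (pre' ++ [ia])).zip (List.drop 1 (p0 :: (pre' ++ [ia])) ++ [(s.length : Int)]))
        = segzip ((p0 :: (pre' ++ [ia])) ++ [(s.length : Int)]) := by
      simpa [List.append_assoc] using zip_eq_segzip (pre' ++ [ia]) p0 (s.length : Int)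
    have hseg : segzip ((p0 :: (pre' ++ [ia])) ++ [(s.length : Int)])
        = segzip (p0 :: (pre' ++ [ia])) ++ [(ia, (s.length : Int))] := by
      simpa [List.cons_append, List.append_assoc] using
        segzip_append_last (p0 :: pre') ia (s.length : Int)
    rw [hzip, hseg, List.foldl_append, hfd]
    have hlen : ((s.length : Int)) - ia = la := by
      have h2 : 1 ≤ s.length - 1 := hk
      omega
    show (if la > lm then ia else im) = _
    simp only [List.foldl, bStep, hlen]
    split_ifs <;> rfl
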